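-- pv_equiv track=rewrite | github.com/loganarmack/LarmackAI | word_counter.py | get_levels
-- ===== SOURCE A (Python) =====
-- from math import floor
--
-- def get_levels(substr_set, num_levels):
--     levels = [[] for _ in range(num_levels)]
--
--     """  cutoff = len(substr_set) / num_levels
--
--     for i, substr in enumerate(substr_set):
--         levels[floor(i / cutoff)].append(substr) """
--
--     cutoffs = [floor(len(substr_set)  / (2 ** (i + 1))) for i in range(num_levels - 1)]
--     cutoffs.reverse()
--
--     curr_level = 0
--     for i, substr in enumerate(substr_set):
--         if curr_level < len(cutoffs) and i > cutoffs[curr_level]: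
--             curr_level += 1
--         levels[curr_level].append(substr)
--
--     return levels
-- ===== SOURCE B (Python) =====
-- def get_levels(substr_set, num_levels):
--     lst = list(substr_set)
--     n = len(lst)
--     cutoffs = [n // 2 ** (i + 1) for i in range(num_levels - 1)]
--     cutoffs.reverse()
--     starts = [0]
--     for k in range(1, num_levels):
--         starts.append(max(cutoffs[k - 1] + 1, starts[-1] + 1))
--     return [lst[starts[k]:(starts[k + 1] if k + 1 < num_levels else n)]
--             for k in range(num_levels)]
-- ===== Notes on version B (the rewrite author's own statement) =====
-- stated objective: alternative
-- what changed: Replaces the per-element counter loop (which walks the list advancing curr_level) by precomputing the slice boundaries start[k] = max(cutoffs[k-1]+1, start[k-1]+1) and building each level as a single list slice.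
import Mathlib
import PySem

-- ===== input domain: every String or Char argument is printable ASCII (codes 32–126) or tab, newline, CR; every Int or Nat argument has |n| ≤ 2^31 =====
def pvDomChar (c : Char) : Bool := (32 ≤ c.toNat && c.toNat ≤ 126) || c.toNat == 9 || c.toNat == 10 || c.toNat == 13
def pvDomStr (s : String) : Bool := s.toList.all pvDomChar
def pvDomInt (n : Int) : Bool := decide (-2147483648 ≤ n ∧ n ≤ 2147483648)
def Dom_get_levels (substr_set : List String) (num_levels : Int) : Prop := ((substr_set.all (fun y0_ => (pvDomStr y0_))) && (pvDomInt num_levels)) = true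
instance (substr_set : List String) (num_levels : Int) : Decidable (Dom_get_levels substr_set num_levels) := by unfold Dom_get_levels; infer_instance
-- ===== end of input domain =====

-- B replaces A's per-element counter loop by precomputing the slice boundaries
-- (start[k] = max(cutoffs[k-1]+1, start[k-1]+1)) and slicing each level out of the list
-- (objective: alternative decomposition, same cost).

-- ===== PORT A =====
-- the loop body of A's 'for i, substr in enumerate(substr_set)' (state = (curr_level, levels))
def getLevelsStep (cutoffs : List Int) (st : Int × List (List String)) (p : Int × String) :
    Int × List (List String) :=
  let curr_level :=
    if st.1 < (cutoffs.length : Int) ∧ p.1 > PySem.List.pyGetD cutoffs st.1 0 then st.1 + 1 else st.1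
  -- levels[curr_level].append(substr); in-range whenever num_levels ≥ 1 (Pre_), else Python raises
  (curr_level, PySem.List.pySetD st.2 curr_level (PySem.List.pyGetD st.2 curr_level [] ++ [p.2]))

def get_levels (substr_set : List String) (num_levels : Int) : List (List String) :=
  -- [[] for _ in range(num_levels)]
  let levels : List (List String) := (PySem.List.pyRange 0 num_levels 1).map (fun _ => [])
  -- floor(len/2**(i+1)) with float '/' is exact integer floor division on the stated domain
  -- (len ≤ 2^31 and the divisor is a power of two), ported as floordiv
  let cutoffs : List Int :=
    ((PySem.List.pyRange 0 (num_levels - 1) 1).map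
      (fun i => PySem.Int.floordiv (substr_set.length : Int) (2 ^ (i + 1).toNat))).reverse
  (((PySem.List.enumerate substr_set).foldl (getLevelsStep cutoffs) (0, levels))).2

-- ===== PORT B =====
def get_levels_alt (substr_set : List String) (num_levels : Int) : List (List String) :=
  let lst := substr_set
  let n : Int := lst.length
  let cutoffs : List Int :=
    ((PySem.List.pyRange 0 (num_levels - 1) 1).map
      (fun i => PySem.Int.floordiv n (2 ^ (i + 1).toNat))).reverse
  -- starts: start[0]=0, start[k]=max(cutoffs[k-1]+1, start[k-1]+1); indices always in range
  let starts : List Int := (PySem.List.pyRange 1 num_levels 1).foldl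
    (fun starts k =>
      starts ++ [max (PySem.List.pyGetD cutoffs (k - 1) 0 + 1) (PySem.List.pyGetD starts (-1) 0 + 1)])
    [0]
  (PySem.List.pyRange 0 num_levels 1).map (fun k =>
    PySem.List.slice lst (some (PySem.List.pyGetD starts k 0))
      (some (if k + 1 < num_levels then PySem.List.pyGetD starts (k + 1) 0 else n)))

-- ===== PRECONDITION & SPEC =====
-- Pre_ excludes num_levels ≤ 0 with a non-empty list, where A raises IndexError (levels is empty).
def Pre_get_levels (substr_set : List String) (num_levels : Int) : Prop :=
  substr_set = [] ∨ 1 ≤ num_levels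
instance (substr_set : List String) (num_levels : Int) : Decidable (Pre_get_levels substr_set num_levels) := by
  unfold Pre_get_levels; infer_instance

def pvWitness_get_levels : List String × Int := (["a", "b", "c"], 2)

def Spec_get_levels (substr_set : List String) (num_levels : Int) (out : List (List String)) : Prop :=
  out = get_levels_alt substr_set num_levels
instance (substr_set : List String) (num_levels : Int) (out : List (List String)) : Decidable (Spec_get_levels substr_set num_levels out) := by
  unfold Spec_get_levels; infer_instance

-- ===== CLAIM (what is proved, stated in full; the proofs are below) =====
def Claim_equal_get_levels : Prop := ∀ (substr_set : List String) (num_levels : Int), Dom_get_levels substr_set num_levels → Pre_get_levels substr_set num_levels → Spec_get_levels substr_set num_levels (get_levels substr_set num_levels)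

-- ===== LEMMAS AND PROOFS =====

-- the slice-boundary sequence: S c 0 = 0, S c (k+1) = max (c_k + 1) (S c k + 1)
def bndS (c : List Int) : Nat → Int
  | 0 => 0
  | k + 1 => max (c.getD k 0 + 1) (bndS c k + 1)

lemma bndS_lt_succ (c : List Int) (k : Nat) : bndS c k < bndS c (k + 1) := by
  simp only [bndS]; omega

lemma bndS_mono (c : List Int) {j k : Nat} (h : j ≤ k) : bndS c j ≤ bndS c k := by
  induction k with
  | zero => simp_all
  | succ k ih =>
    rcases Nat.lt_or_ge j (k+1) with h' | h'
    · exact le_trans (ih (by omega)) (le_of_lt (bndS_lt_succ c k))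
    · have : j = k + 1 := by omega
      simp [this]

lemma bndS_nonneg (c : List Int) (k : Nat) : 0 ≤ bndS c k := by
  induction k with
  | zero => simp [bndS]
  | succ k ih => simp [bndS]; omega

-- A's loop, characterized: starting at global index i in state (cl, levels) satisfying the
-- interval invariant, bucket k of the final levels is bucket k of levels plus the elements of
-- rest whose global index lies in [bndS c k, bndS c (k+1)) (resp. [bndS c m, n) for the last).
lemma foldA_char (c : List Int) (n : Nat) (h0 : 0 ≤ c.getD 0 0)
    (rest : List String) : ∀ (i cl : Nat) (levels : List (List String)),
    levels.length = c.length + 1 →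
    cl ≤ c.length →
    i + rest.length = n →
    (bndS c cl < (i:Int) ∨ (cl = 0 ∧ i = 0)) →
    (cl < c.length → (i:Int) ≤ bndS c (cl+1)) →
    (((PySem.List.enumerate rest (i:Int)).foldl (getLevelsStep c) ((cl:Int), levels)).2.length = c.length + 1 ∧
     ∀ k, k ≤ c.length →
       ((PySem.List.enumerate rest (i:Int)).foldl (getLevelsStep c) ((cl:Int), levels)).2.getD k [] =
         levels.getD k [] ++
         (rest.drop ((bndS c k).toNat - i)).take
           ((if k < c.length then (bndS c (k+1)).toNat else n) - max (bndS c k).toNat i)) := by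
  induction rest with
  | nil =>
    intro i cl levels hlen hcl hn hlo hhi
    simp [PySem.List.enumerate_nil, hlen]
  | cons x rest ih =>
    intro i cl levels hlen hcl hn hlo hhi
    rw [PySem.List.enumerate_cons, List.foldl_cons]
    -- evaluate one step of the loop
    have hstep : getLevelsStep c ((cl:Int), levels) ((i:Int), x) =
        (((if cl < c.length ∧ c.getD cl 0 < (i:Int) then cl+1 else cl : Nat) : Int),
         levels.set (if cl < c.length ∧ c.getD cl 0 < (i:Int) then cl+1 else cl)
           (levels.getD (if cl < c.length ∧ c.getD cl 0 < (i:Int) then cl+1 else cl) [] ++ [x])) := by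
      simp only [getLevelsStep, PySem.List.pyGetD_natCast, PySem.List.pySetD_natCast]
      by_cases h : cl < c.length ∧ c.getD cl 0 < (i:Int)
      · have h' : ((cl:Int) < (c.length:Int) ∧ ((i:Int) > c.getD cl 0)) := by
          exact ⟨by exact_mod_cast h.1, h.2⟩
        simp only [if_pos h', if_pos h]
        have hcast : ((cl:Int) + 1) = (((cl + 1 : Nat)):Int) := by push_cast; ring
        rw [hcast, PySem.List.pySetD_natCast, PySem.List.pyGetD_natCast]
      · have h' : ¬((cl:Int) < (c.length:Int) ∧ ((i:Int) > c.getD cl 0)) := by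
          intro hc; exact h ⟨by exact_mod_cast hc.1, hc.2⟩
        simp only [if_neg h', if_neg h]
        rw [PySem.List.pySetD_natCast, PySem.List.pyGetD_natCast]
    rw [hstep]
    set cl' : Nat := if cl < c.length ∧ c.getD cl 0 < (i:Int) then cl+1 else cl with hcl'def
    set levels' := levels.set cl' (levels.getD cl' [] ++ [x]) with hlev'def
    -- the assigned level cl' satisfies: bndS cl' ≤ i < bndS (cl'+1) (resp. < n when cl' = len)
    have hcl'le : cl' ≤ c.length := by
      rw [hcl'def]; split_ifs with h
      · omega
      · exact hcl
    have hA : bndS c cl' ≤ (i:Int) := by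
      rw [hcl'def]; split_ifs with h
      · have hlt : bndS c cl < (i:Int) := by
          rcases hlo with h' | ⟨h1, h2⟩
          · exact h'
          · exfalso; subst h1; subst h2; have h2 := h.2; push_cast at h2; omega
        simp only [bndS]; omega
      · rcases hlo with h' | ⟨h1, h2⟩
        · omega
        · subst h1; subst h2; simp [bndS]
    have hB : cl' < c.length → (i:Int) < bndS c (cl'+1) := by
      intro hlt
      rw [hcl'def] at hlt ⊢; split_ifs at hlt ⊢ with h
      · have h1 : (i:Int) ≤ bndS c (cl+1) := hhi h.1
        have h2 : bndS c (cl+1) ≤ (i:Int) := by rw [hcl'def] at hA; simp only [if_pos h] at hA; exact hA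
        have := bndS_lt_succ c (cl+1)
        omega
      · push_neg at h
        have : bndS c (cl+1) = max (c.getD cl 0 + 1) (bndS c cl + 1) := rfl
        have hc := h hlt
        omega
    -- apply the induction hypothesis at (i+1, cl', levels')
    have hih := ih (i+1) cl' levels' (by simp [hlev'def, hlen]) hcl'le (by simp at hn; omega)
      (Or.inl (by push_cast; omega))
      (by intro h; have := hB h; push_cast; omega)
    push_cast at hih
    refine ⟨hih.1, ?_⟩
    intro k hk
    rw [hih.2 k hk]
    -- bucket contributions: element i goes to bucket cl' and to no other
    by_cases hkc : k = cl'
    · rw [hkc]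
      have hBk : (i:Nat) < (if cl' < c.length then (bndS c (cl'+1)).toNat else n) := by
        split_ifs with h
        · have := hB h; omega
        · simp at hn; omega
      have hAk : (bndS c cl').toNat ≤ i := by omega
      have hget : levels'.getD cl' [] = levels.getD cl' [] ++ [x] := by
        rw [hlev'def]
        have hklen : cl' < levels.length := by omega
        rw [List.getD_eq_getElem?_getD, List.getElem?_set_self (by omega), List.getD_eq_getElem?_getD]
        simp [hklen]
      rw [hget]
      have hd1 : (bndS c cl').toNat - i = 0 := by omega
      have hd2 : (bndS c cl').toNat - (i+1) = 0 := by omega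
      have hm1 : max (bndS c cl').toNat i = i := by omega
      have hm2 : max (bndS c cl').toNat (i+1) = i+1 := by omega
      rw [hd1, hd2, hm1, hm2, List.drop_zero, List.drop_zero]
      have htk : (x :: rest).take ((if cl' < c.length then (bndS c (cl'+1)).toNat else n) - i) =
          x :: rest.take ((if cl' < c.length then (bndS c (cl'+1)).toNat else n) - (i+1)) := by
        have h1 : (if cl' < c.length then (bndS c (cl'+1)).toNat else n) - i =
            ((if cl' < c.length then (bndS c (cl'+1)).toNat else n) - (i+1)) + 1 := by omega
        rw [h1, List.take_succ_cons]
      rw [htk, List.append_assoc]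
      simp
    · -- k ≠ cl' : i is outside [bndS k, bndS (k+1))
      have hget : levels'.getD k [] = levels.getD k [] := by
        rw [hlev'def, List.getD_eq_getElem?_getD, List.getElem?_set_ne (by omega), ← List.getD_eq_getElem?_getD]
      rw [hget]
      have hout : i < (bndS c k).toNat ∨ (if k < c.length then (bndS c (k+1)).toNat else n) ≤ i := by
        rcases Nat.lt_or_ge k cl' with hlt | hge
        · right
          have hk1 : k < c.length := by omega
          have := bndS_mono c (show k+1 ≤ cl' by omega)
          have := bndS_nonneg c (k+1)
          simp only [if_pos hk1]
          omega
        · left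
          have hc : cl' < c.length := by omega
          have h1 := hB hc
          have := bndS_mono c (show cl'+1 ≤ k by omega)
          omega
      rcases hout with hlt | hge
      · have h1 : (x :: rest).drop ((bndS c k).toNat - i) = rest.drop ((bndS c k).toNat - (i+1)) := by
          have : (bndS c k).toNat - i = ((bndS c k).toNat - (i+1)) + 1 := by omega
          rw [this, List.drop_succ_cons]
        have h2 : max (bndS c k).toNat i = (bndS c k).toNat := by omega
        have h3 : max (bndS c k).toNat (i+1) = (bndS c k).toNat := by omega
        rw [h1, h2, h3]
      · have h2 : (if k < c.length then (bndS c (k+1)).toNat else n) - max (bndS c k).toNat i = 0 := by omega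
        have h3 : (if k < c.length then (bndS c (k+1)).toNat else n) - max (bndS c k).toNat (i+1) = 0 := by omega
        rw [h2, h3]
        simp

-- B's starts list equals the boundary sequence bndS
lemma starts_spec (c : List Int) : ∀ (j : Nat),
    (PySem.List.pyRange 1 (1 + (j:Int)) 1).foldl
      (fun starts k =>
        starts ++ [max (PySem.List.pyGetD c (k - 1) 0 + 1) (PySem.List.pyGetD starts (-1) 0 + 1)]) [0]
    = (List.range (j+1)).map (fun k => bndS c k) := by
  intro j
  induction j with
  | zero =>
    rw [PySem.List.pyRange_one_eq_nil (by norm_num)]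
    simp [bndS]
  | succ j ih =>
    have hsz : (1 : Int) + ((j:Int) + 1) = (1 + (j:Int)) + 1 := by ring
    rw [show ((j+1 : Nat) : Int) = (j:Int) + 1 by push_cast; ring, hsz,
        PySem.List.pyRange_one_succ_right (by omega), List.foldl_append, ih]
    simp only [List.foldl_cons, List.foldl_nil]
    have h1 : (1 + (j:Int)) - 1 = ((j:Nat):Int) := by ring
    rw [h1, PySem.List.pyGetD_natCast]
    rw [show (List.range (j+1)).map (fun k => bndS c k)
          = (List.range j).map (fun k => bndS c k) ++ [bndS c j] by simp [List.range_succ]]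
    rw [PySem.List.pyGetD_neg_one_append_singleton]
    have h2 : max (c.getD j 0 + 1) (bndS c j + 1) = bndS c (j+1) := rfl
    rw [List.append_assoc, h2]
    simp [List.range_succ]

lemma getD_map_const (l : List Int) (k : Nat) :
    (l.map (fun _ => ([] : List String))).getD k [] = [] := by
  induction l generalizing k with
  | nil => simp
  | cons a l ih => cases k <;> simp_all

lemma getD_map_range' (f : Nat → Int) (n k : Nat) (hk : k < n) (d : Int) :
    ((List.range n).map f).getD k d = f k := by
  rw [List.getD_eq_getElem _ _ (by simpa using hk)]
  simp

lemma eq_of_getD (l1 l2 : List (List String)) (h : l1.length = l2.length)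
    (h2 : ∀ k, k < l1.length → l1.getD k [] = l2.getD k []) : l1 = l2 := by
  apply List.ext_getElem h
  intro k hk1 hk2
  have := h2 k hk1
  rwa [List.getD_eq_getElem _ _ hk1, List.getD_eq_getElem _ _ hk2] at this

theorem get_levels_spec : Claim_equal_get_levels := by
  intro s N hdom hpre
  unfold Spec_get_levels
  by_cases hN : 1 ≤ N
  · -- the real case
    set n : Nat := s.length with hndef
    set c : List Int :=
      ((PySem.List.pyRange 0 (N - 1) 1).map
        (fun i => PySem.Int.floordiv ((s.length : Int)) (2 ^ (i + 1).toNat))).reverse with hcdef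
    have hclen : (c.length : Int) = N - 1 := by
      rw [hcdef]
      simp [PySem.List.length_pyRange_one]
      omega
    have h0 : 0 ≤ c.getD 0 0 := by
      have hmem : ∀ x ∈ c, 0 ≤ x := by
        intro x hx
        rw [hcdef] at hx
        rw [List.mem_reverse, List.mem_map] at hx
        obtain ⟨ii, _, rfl⟩ := hx
        rw [PySem.Int.floordiv_eq_ediv_of_pos (by positivity)]
        exact Int.ediv_nonneg (by positivity) (by positivity)
      rcases hc : c with _ | ⟨a, t⟩
      · simp
      · exact hmem a (by rw [hc]; exact List.mem_cons_self)
    have HA := foldA_char c s.length h0 s 0 0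
        ((PySem.List.pyRange 0 N 1).map (fun _ => ([] : List String)))
        (by simp [PySem.List.length_pyRange_one]; omega)
        (Nat.zero_le _) (Nat.zero_add _) (Or.inr ⟨rfl, rfl⟩)
        (fun _ => by simpa using bndS_nonneg c 1)
    simp only [Nat.cast_zero, Nat.sub_zero, Nat.max_zero, getD_map_const, List.nil_append] at HA
    have hN1 : N = 1 + (c.length : Int) := by omega
    rw [hN1] at HA
    simp only [get_levels, get_levels_alt]
    rw [← hcdef, hN1]
    simp only [starts_spec c c.length]
    apply eq_of_getD
    · rw [HA.1]
      simp [PySem.List.length_pyRange_one]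
      omega
    · intro k hk
      rw [HA.1] at hk
      rw [HA.2 k (by omega)]
      have hlenR : k < (((PySem.List.pyRange 0 (1 + (c.length:Int)) 1)).map (fun kk =>
          PySem.List.slice s (some (PySem.List.pyGetD ((List.range (c.length+1)).map (fun k => bndS c k)) kk 0))
            (some (if kk + 1 < 1 + (c.length:Int) then PySem.List.pyGetD ((List.range (c.length+1)).map (fun k => bndS c k)) (kk + 1) 0 else (s.length : Int))))).length := by
        simp [PySem.List.length_pyRange_one]
        omega
      rw [List.getD_eq_getElem _ _ hlenR, List.getElem_map, PySem.List.getElem_pyRange_one]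
      simp only [zero_add]
      rw [PySem.List.pyGetD_natCast, getD_map_range' _ _ _ (by omega)]
      by_cases hkm : k < c.length
      · rw [if_pos hkm, show ((k:Int) + 1) = (((k+1 : Nat)) : Int) by push_cast; ring,
            PySem.List.pyGetD_natCast, getD_map_range' _ _ _ (by omega),
            if_pos (show (((k+1:Nat)) : Int) < 1 + (c.length:Int) by push_cast; omega),
            PySem.List.slice_toNat _ (bndS_nonneg c k) (bndS_nonneg c (k+1))]
      · rw [if_neg hkm, show ((k:Int) + 1) = (((k+1 : Nat)) : Int) by push_cast; ring,
            if_neg (show ¬((((k+1:Nat)) : Int) < 1 + (c.length:Int)) by push_cast; omega),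
            PySem.List.slice_toNat _ (bndS_nonneg c k) (Int.natCast_nonneg _)]
        simp
  · -- num_levels ≤ 0: Pre_ forces substr_set = []
    have hs : s = [] := by
      rcases hpre with h | h
      · exact h
      · omega
    subst hs
    have hnil : PySem.List.pyRange 0 N 1 = [] := PySem.List.pyRange_one_eq_nil (by omega)
    simp [get_levels, get_levels_alt, hnil, PySem.List.enumerate_nil]
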